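-- pv_equiv track=rewrite | github.com/JKSANJAY27/MemoFlux | data_pipeline/session_builder.py | _split_sub_sessions
-- ===== SOURCE A (Python) =====
-- from typing import Dict, List, Optional, Tuple
--
-- SESSION_GAP_SECONDS = 300  # 5 minutes → new sub-session
--
-- def _split_sub_sessions(events: List[Dict]) -> List[List[Dict]]:
--     """Split day events into sub-sessions on 5-min inactivity gaps."""
--     if not events:
--         return []
--     sub_sessions: List[List[Dict]] = [[events[0]]]
--     for ev in events[1:]:
--         prev_ts = sub_sessions[-1][-1].get("timestamp_unix", 0)
--         curr_ts = ev.get("timestamp_unix", 0)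
--         if curr_ts - prev_ts > SESSION_GAP_SECONDS:
--             sub_sessions.append([ev])
--         else:
--             sub_sessions[-1].append(ev)
--     return sub_sessions
-- ===== SOURCE B (Python) =====
-- SESSION_GAP_SECONDS = 300  # 5 minutes → new sub-session
--
--
-- def _take_session(prev, rest):
--     """Peel off the rest of the sub-session that `prev` belongs to.
--
--     Returns (group, remaining): `group` starts with `prev` and extends while
--     consecutive gaps stay within SESSION_GAP_SECONDS.
--     """
--     if rest and rest[0].get("timestamp_unix", 0) - prev.get("timestamp_unix", 0) <= SESSION_GAP_SECONDS:
--         group, remaining = _take_session(rest[0], rest[1:])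
--         return [prev] + group, remaining
--     return [prev], rest
--
--
-- def _split_sub_sessions(events):
--     """Split day events into sub-sessions on 5-min inactivity gaps."""
--     if not events:
--         return []
--     group, remaining = _take_session(events[0], events[1:])
--     return [group] + _split_sub_sessions(remaining)
-- ===== Notes on version B (the rewrite author's own statement) =====
-- stated objective: alternative
-- what changed: Replaces A's single loop that mutates the last bucket of a growing list-of-lists by structural recursion: a helper peels one complete sub-session off the front and the sessions are consed together front-to-back.
import Mathlib
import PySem

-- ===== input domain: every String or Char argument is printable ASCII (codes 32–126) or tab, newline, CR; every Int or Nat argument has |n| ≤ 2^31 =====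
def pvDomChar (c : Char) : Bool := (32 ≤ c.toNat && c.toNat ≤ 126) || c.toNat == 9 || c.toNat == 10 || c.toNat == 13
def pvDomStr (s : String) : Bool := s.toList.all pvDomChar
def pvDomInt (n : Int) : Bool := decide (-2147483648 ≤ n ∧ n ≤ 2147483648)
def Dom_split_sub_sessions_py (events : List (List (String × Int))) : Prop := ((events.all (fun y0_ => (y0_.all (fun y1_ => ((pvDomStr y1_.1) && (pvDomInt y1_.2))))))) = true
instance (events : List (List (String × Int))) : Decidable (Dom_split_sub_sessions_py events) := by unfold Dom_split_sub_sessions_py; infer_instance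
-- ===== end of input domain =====

-- ===== PORT A =====
-- B changes the decomposition only (same return value; neither version mutates its argument).
-- subs[-1][-1] is modelled with getLastD: every group in the state is nonempty, so Python's
-- negative indexing never raises and getLastD with a [] default is exact there.
def split_sub_sessions_py (events : List (List (String × Int))) : List (List (List (String × Int))) :=
  match events with
  | [] => []
  | e0 :: rest =>
    rest.foldl (fun subs ev =>
      let prev_ts := PySem.Dict.getD (PySem.Dict.mk ((subs.getLastD []).getLastD [])) "timestamp_unix" 0
      let curr_ts := PySem.Dict.getD (PySem.Dict.mk ev) "timestamp_unix" 0
      if curr_ts - prev_ts > 300 then subs ++ [[ev]]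
      else subs.dropLast ++ [subs.getLastD [] ++ [ev]]) [[e0]]

-- ===== PORT B =====
-- helper _take_session of Source B
def pvTakeSession (prev : List (String × Int)) (rest : List (List (String × Int))) :
    List (List (String × Int)) × List (List (String × Int)) :=
  match rest with
  | [] => ([prev], [])
  | e :: r =>
    if PySem.Dict.getD (PySem.Dict.mk e) "timestamp_unix" 0
        - PySem.Dict.getD (PySem.Dict.mk prev) "timestamp_unix" 0 ≤ 300 then
      let gr := pvTakeSession e r
      (prev :: gr.1, gr.2)
    else ([prev], e :: r)

-- needed for termination of the port of B
theorem pvTakeSession_snd_length (rest : List (List (String × Int))) (prev : List (String × Int)) :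
    (pvTakeSession prev rest).2.length ≤ rest.length := by
  induction rest generalizing prev with
  | nil => simp [pvTakeSession]
  | cons e r ih =>
    simp only [pvTakeSession]
    split
    · exact Nat.le_succ_of_le (ih e)
    · simp

def split_sub_sessions_py_alt (events : List (List (String × Int))) : List (List (List (String × Int))) :=
  match events with
  | [] => []
  | e0 :: rest =>
    (pvTakeSession e0 rest).1 :: split_sub_sessions_py_alt (pvTakeSession e0 rest).2
termination_by events.length
decreasing_by
  simpa using Nat.lt_succ_of_le (pvTakeSession_snd_length rest e0)

-- ===== PRECONDITION & SPEC =====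
def Spec_split_sub_sessions_py (events : List (List (String × Int))) (out : List (List (List (String × Int)))) : Prop := out = split_sub_sessions_py_alt events
instance (events : List (List (String × Int))) (out : List (List (List (String × Int)))) : Decidable (Spec_split_sub_sessions_py events out) := by unfold Spec_split_sub_sessions_py; infer_instance

-- ===== CLAIM (what is proved, stated in full; the proofs are below) =====
def Claim_equal_split_sub_sessions_py : Prop := ∀ (events : List (List (String × Int))), Dom_split_sub_sessions_py events → Spec_split_sub_sessions_py events (split_sub_sessions_py events)

-- ===== LEMMAS AND PROOFS =====

-- the A-side loop step, named so the fold invariant can be stated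
def pvStepA (subs : List (List (List (String × Int)))) (ev : List (String × Int)) :
    List (List (List (String × Int))) :=
  let prev_ts := PySem.Dict.getD (PySem.Dict.mk ((subs.getLastD []).getLastD [])) "timestamp_unix" 0
  let curr_ts := PySem.Dict.getD (PySem.Dict.mk ev) "timestamp_unix" 0
  if curr_ts - prev_ts > 300 then subs ++ [[ev]]
  else subs.dropLast ++ [subs.getLastD [] ++ [ev]]

theorem pvFoldA (rest : List (List (String × Int))) :
    ∀ (acc : List (List (List (String × Int)))) (g : List (List (String × Int)))
      (p : List (String × Int)),
      rest.foldl pvStepA (acc ++ [g ++ [p]]) =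
        acc ++ ((g ++ (pvTakeSession p rest).1) :: split_sub_sessions_py_alt (pvTakeSession p rest).2) := by
  induction rest with
  | nil => intro acc g p; simp [pvTakeSession, split_sub_sessions_py_alt]
  | cons e r ih =>
    intro acc g p
    rw [List.foldl_cons]
    by_cases hc : PySem.Dict.getD (PySem.Dict.mk e) "timestamp_unix" 0
        - PySem.Dict.getD (PySem.Dict.mk p) "timestamp_unix" 0 ≤ 300
    · have hstep : pvStepA (acc ++ [g ++ [p]]) e = acc ++ [(g ++ [p]) ++ [e]] := by
        simp only [pvStepA, List.getLastD_concat, List.dropLast_concat]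
        rw [if_neg (by omega)]
      have ht : pvTakeSession p (e :: r) = (p :: (pvTakeSession e r).1, (pvTakeSession e r).2) := by
        simp only [pvTakeSession]; rw [if_pos hc]
      rw [hstep, ih, ht]
      simp
    · have hstep : pvStepA (acc ++ [g ++ [p]]) e
          = (acc ++ [g ++ [p]]) ++ [([] : List (List (String × Int))) ++ [e]] := by
        simp only [pvStepA, List.getLastD_concat]
        rw [if_pos (by omega)]
        simp
      have ht : pvTakeSession p (e :: r) = ([p], e :: r) := by
        simp only [pvTakeSession]; rw [if_neg hc]
      rw [hstep, ih, ht]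
      simp [split_sub_sessions_py_alt]

-- ===== VERDICT (by name: the statement is the Claim_ definition above) =====
theorem split_sub_sessions_py_spec : Claim_equal_split_sub_sessions_py := by
  intro events _
  unfold Spec_split_sub_sessions_py
  cases events with
  | nil => simp [split_sub_sessions_py, split_sub_sessions_py_alt]
  | cons e0 rest =>
    show rest.foldl pvStepA ([] ++ [[] ++ [e0]]) = _
    rw [pvFoldA]
    simp [split_sub_sessions_py_alt]
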